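-- pv_equiv track=rewrite | github.com/sgbruce/syntonics_filesystem | cluster.py | get_pn
-- ===== SOURCE A (Python) =====
-- acceptable_chars = {'1','2','3','4','5','6','7','8','9','0','X','-'}
--
-- def get_pn(name):
--     pn = None
--     i=0
--     while not pn and i <= len(name)-11:
--         substr = name[0+i:11+i]
--         valid = True
--         for char in substr:
--             if char not in acceptable_chars:
--                 valid = False
--                 break
--         if valid:
--             pn = name[0+i:11+i]
--         i+=1
--     return pn
-- ===== SOURCE B (Python) =====
-- acceptable_chars = {'1','2','3','4','5','6','7','8','9','0','X','-'}
--
-- def get_pn(name):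
--     # single pass: maintain the length of the current run of acceptable chars;
--     # the first time the run reaches 11, that window is the leftmost valid one.
--     run = 0
--     for j, ch in enumerate(name):
--         if ch in acceptable_chars:
--             run += 1
--             if run == 11:
--                 return name[j-10:j+1]
--         else:
--             run = 0
--     return None
-- ===== Notes on version B (the rewrite author's own statement) =====
-- stated objective: faster
-- what changed: Replaces the sliding-window rescans (for each start index revalidate up to 11 chars) with a single pass that keeps a run-length counter of consecutive acceptable chars and returns the window the first time the run reaches 11.
import Mathlib
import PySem

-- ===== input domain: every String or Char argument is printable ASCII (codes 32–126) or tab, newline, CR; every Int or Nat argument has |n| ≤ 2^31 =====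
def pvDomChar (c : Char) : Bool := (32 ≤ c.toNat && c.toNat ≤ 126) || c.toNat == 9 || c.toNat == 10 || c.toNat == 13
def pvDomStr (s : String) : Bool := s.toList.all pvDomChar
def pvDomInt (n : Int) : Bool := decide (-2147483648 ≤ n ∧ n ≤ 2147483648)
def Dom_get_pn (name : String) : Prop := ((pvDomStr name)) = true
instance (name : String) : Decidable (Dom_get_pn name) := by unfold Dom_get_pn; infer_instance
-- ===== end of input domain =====

-- B replaces A's per-start-index window rescans by ONE pass keeping a run-length counter
-- of consecutive acceptable characters (same result, fewer character tests).

-- ===== PORT A =====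
-- the module constant acceptable_chars (a set of chars used only for membership tests)
def pvAccept : List Char := ['1','2','3','4','5','6','7','8','9','0','X','-']

-- A's while loop: i advances while pn is unset and i ≤ len(name)-11 (in Nat: i+11 ≤ len);
-- the slice name[0+i:11+i] with 0 ≤ i is drop i / take 11; the inner for-with-break
-- validity check over the substring is exactly List.all.
def getPnLoopA (cs : List Char) (i : Nat) : Option String :=
  if i + 11 ≤ cs.length then
    let substr := (cs.drop i).take 11
    if substr.all (fun c => pvAccept.contains c) then some (String.ofList substr)
    else getPnLoopA cs (i + 1)
  else none
termination_by cs.length - i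

def get_pn (name : String) : Option String := getPnLoopA name.toList 0

-- ===== PORT B =====
-- B's single pass: `rest` is the suffix still to scan, `j` the current index in `full`,
-- `run` the length of the current run of acceptable chars; name[j-10:j+1] = drop (j-10) / take 11.
def getPnLoopB (full rest : List Char) (j run : Nat) : Option String :=
  match rest with
  | [] => none
  | c :: rs =>
    if pvAccept.contains c then
      if run + 1 = 11 then some (String.ofList ((full.drop (j - 10)).take 11))
      else getPnLoopB full rs (j + 1) (run + 1)
    else getPnLoopB full rs (j + 1) 0

def get_pn_alt (name : String) : Option String := getPnLoopB name.toList name.toList 0 0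

-- ===== PRECONDITION & SPEC =====
def Spec_get_pn (name : String) (out : Option String) : Prop := out = get_pn_alt name
instance (name : String) (out : Option String) : Decidable (Spec_get_pn name out) := by unfold Spec_get_pn; infer_instance

-- ===== CLAIM (what is proved, stated in full; the proofs are below) =====
def Claim_equal_get_pn : Prop := ∀ (name : String), Dom_get_pn name → Spec_get_pn name (get_pn name)

-- ===== LEMMAS AND PROOFS =====

-- when the remaining string is shorter than 11, A's loop returns none
theorem loopA_none (cs : List Char) (i : Nat) (h : cs.length < i + 11) :
    getPnLoopA cs i = none := by
  unfold getPnLoopA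
  simp [Nat.not_le.mpr h]

-- a window starting at i that contains a bad char at position p fails A's validity check
theorem window_bad (cs : List Char) (i p : Nat) (hip : i ≤ p) (hwin : p < i + 11)
    (hp : p < cs.length) (hbad : pvAccept.contains cs[p] = false) :
    ((cs.drop i).take 11).all (fun c => pvAccept.contains c) = false := by
  have hlen : p - i < ((cs.drop i).take 11).length := by
    simp [List.length_take, List.length_drop]
    omega
  have hmem : cs[p] ∈ (cs.drop i).take 11 := by
    have : ((cs.drop i).take 11)[p - i]'hlen = cs[p] := by
      rw [List.getElem_take, List.getElem_drop]
      congr 1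
      omega
    rw [← this]
    exact List.getElem_mem _
  rw [List.all_eq_false]
  exact ⟨cs[p], hmem, by simpa using hbad⟩

-- a bad char at position p kills every window starting at i ∈ [p-k, p] (k < 11),
-- so A's loop skips straight past it
theorem loopA_skip (cs : List Char) (p : Nat) (hp : p < cs.length)
    (hbad : pvAccept.contains cs[p] = false) :
    ∀ k, k < 11 → k ≤ p → getPnLoopA cs (p - k) = getPnLoopA cs (p + 1) := by
  intro k
  induction k with
  | zero =>
    intro _ _
    simp only [Nat.sub_zero]
    by_cases h : p + 11 ≤ cs.length
    · rw [getPnLoopA]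
      simp only [if_pos h]
      rw [window_bad cs p p le_rfl (by omega) hp hbad]
      simp
    · rw [loopA_none cs p (by omega), loopA_none cs (p + 1) (by omega)]
  | succ k ih =>
    intro hk hkp
    have hi : p - (k + 1) + 1 = p - k := by omega
    by_cases h : p - (k + 1) + 11 ≤ cs.length
    · rw [getPnLoopA]
      simp only [if_pos h]
      rw [window_bad cs (p - (k + 1)) p (by omega) (by omega) hp hbad]
      rw [if_neg (by exact Bool.false_ne_true)]
      rw [hi]
      exact ih (by omega) (by omega)
    · rw [loopA_none cs (p - (k + 1)) (by omega), loopA_none cs (p + 1) (by omega)]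

-- main invariant: B scanning `rest` with a current acceptable run `runCs` (run < 11)
-- behind it computes exactly what A's loop computes starting at the run's start index
theorem loopB_eq (full : List Char) :
    ∀ rest pre runCs, full = pre ++ runCs ++ rest →
      (∀ c ∈ runCs, pvAccept.contains c = true) → runCs.length < 11 →
      getPnLoopB full rest (pre.length + runCs.length) runCs.length
        = getPnLoopA full pre.length := by
  intro rest
  induction rest with
  | nil =>
    intro pre runCs hfull _ hlt
    rw [getPnLoopB, loopA_none]
    subst hfull
    simp
    omega
  | cons c rs ih =>
    intro pre runCs hfull hrun hlt
    rw [getPnLoopB]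
    by_cases hc : pvAccept.contains c = true
    · rw [if_pos hc]
      by_cases h11 : runCs.length + 1 = 11
      · rw [if_pos h11]
        have hr10 : runCs.length = 10 := by omega
        have hdrop : full.drop (pre.length + runCs.length - 10) = runCs ++ c :: rs := by
          subst hfull
          rw [hr10]
          simp
        have hsub : (full.drop (pre.length + runCs.length - 10)).take 11
            = runCs ++ [c] := by
          rw [hdrop]
          rw [List.take_append]
          rw [hr10]
          simp
          omega
        have hlenA : pre.length + 11 ≤ full.length := by
          subst hfull; simp; omega
        rw [getPnLoopA]
        rw [if_pos hlenA]
        have hdropA : full.drop pre.length = runCs ++ c :: rs := by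
          subst hfull; simp
        have hsubA : (full.drop pre.length).take 11 = runCs ++ [c] := by
          rw [hdropA, List.take_append, hr10]
          simp
          omega
        simp only [hsubA]
        have hall : (runCs ++ [c]).all (fun c => pvAccept.contains c) = true := by
          rw [List.all_eq_true]
          intro x hx
          rcases List.mem_append.mp hx with h | h
          · exact hrun x h
          · simp at h; subst h; exact hc
        rw [hall]
        simp [hsub]
      · rw [if_neg h11]
        have := ih pre (runCs ++ [c])
          (by rw [hfull]; simp)
          (by intro x hx
              rcases List.mem_append.mp hx with h | h
              · exact hrun x h
              · simp at h; subst h; exact hc)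
          (by simp; omega)
        simpa [Nat.add_assoc] using this
    · rw [if_neg hc]
      have hbadc : pvAccept.contains c = false := by
        cases h : pvAccept.contains c
        · rfl
        · exact absurd h hc
      have := ih (pre ++ runCs ++ [c]) []
        (by rw [hfull]; simp)
        (by intro x hx; simp at hx)
        (by simp)
      simp only [List.length_append, List.length_cons, List.length_nil] at this
      have hstep := this
      -- hstep : getPnLoopB full rs (pre.length + runCs.length + 1 + 0) 0
      --           = getPnLoopA full (pre.length + runCs.length + 1)
      have hp : pre.length + runCs.length < full.length := by
        subst hfull; simp
      have hidx : full[pre.length + runCs.length]'hp = c := by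
        subst hfull
        simp
      have hskip := loopA_skip full (pre.length + runCs.length) hp
        (by rw [hidx]; exact hbadc) runCs.length hlt (by omega)
      have hsi : pre.length + runCs.length - runCs.length = pre.length := by omega
      rw [hsi] at hskip
      rw [hskip]
      convert hstep using 2

theorem get_pn_spec : Claim_equal_get_pn := by
  intro name _
  unfold Spec_get_pn get_pn get_pn_alt
  have := loopB_eq name.toList name.toList [] [] (by simp) (by intro x hx; simp at hx) (by simp)
  simpa using this.symm
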